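-- pv_equiv track=rewrite | github.com/And1F/CodeWars | 0075_highest_consecutive_consonants.py | solve
-- ===== SOURCE A (Python) =====
-- def solve(string):
--     cnt = 0
--     ans = []
--     for letter in string:
--         if letter not in ["a", "e", "i", "o", "u"]:
--             cnt += "abcdefghijklmnopqrstuvwxyz".index(letter) + 1
--         else:
--             ans.append(cnt)
--             cnt = 0
--     ans.append(cnt)
--     return max(ans)
-- ===== SOURCE B (Python) =====
-- import re
--
-- def solve(string):
--     return max(sum("abcdefghijklmnopqrstuvwxyz".index(c) + 1 for c in part)
--                for part in re.split('[aeiou]', string))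
-- ===== Notes on version B (the rewrite author's own statement) =====
-- stated objective: simpler
-- what changed: Replaces the interleaved accumulate/reset-into-a-list loop with a split-on-vowels then per-segment-sum-and-max decomposition (two lines).
import Mathlib
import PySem

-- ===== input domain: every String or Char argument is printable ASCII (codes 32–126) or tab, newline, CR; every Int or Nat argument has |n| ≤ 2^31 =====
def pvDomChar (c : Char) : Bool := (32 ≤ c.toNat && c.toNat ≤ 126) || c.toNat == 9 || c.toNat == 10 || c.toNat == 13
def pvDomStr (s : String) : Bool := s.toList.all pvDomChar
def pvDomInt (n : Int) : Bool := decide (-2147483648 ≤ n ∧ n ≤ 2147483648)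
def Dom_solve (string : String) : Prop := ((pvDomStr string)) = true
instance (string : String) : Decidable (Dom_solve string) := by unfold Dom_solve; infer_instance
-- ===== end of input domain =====

-- B replaces A's accumulate/reset loop by a split-on-vowels then per-segment sum-and-max decomposition (simpler).

-- value of one letter: "abcdefghijklmnopqrstuvwxyz".index(c) + 1; exact on Pre_ (c a lowercase letter)
def pvVal (c : Char) : Int :=
  ((PySem.List.index? "abcdefghijklmnopqrstuvwxyz".toList c).getD 0 : Int) + 1

def pvVowel (c : Char) : Bool := c == 'a' || c == 'e' || c == 'i' || c == 'o' || c == 'u'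

-- ===== PORT A =====
-- the for-loop over the string, state (cnt, ans)
def solveStep (st : Int × List Int) (c : Char) : Int × List Int :=
  if !(pvVowel c) then (st.1 + pvVal c, st.2) else (0, st.2 ++ [st.1])

def solve (string : String) : Int :=
  let st := string.toList.foldl solveStep (0, [])
  (PySem.List.max? (st.2 ++ [st.1]) (fun x => x)).getD 0   -- the list is nonempty

-- ===== PORT B =====
-- re.split('[aeiou]', s): maximal runs between vowel occurrences (always nonempty, '' segments kept)
def pvSplit : List Char → List (List Char)
  | [] => [[]]
  | c :: cs =>
    if pvVowel c then [] :: pvSplit cs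
    else
      match pvSplit cs with
      | p :: ps => (c :: p) :: ps
      | [] => [[c]]

def solve_alt (string : String) : Int :=
  (PySem.List.max? ((pvSplit string.toList).map (fun p => p.foldl (fun s c => s + pvVal c) 0))
    (fun x => x)).getD 0

-- ===== PRECONDITION & SPEC =====
-- A raises ValueError (.index) on any character that is not a lowercase ASCII letter; exactly those inputs are excluded.
def Pre_solve (string : String) : Prop :=
  (string.toList.all fun c => decide (97 ≤ c.toNat) && decide (c.toNat ≤ 122)) = true
instance (string : String) : Decidable (Pre_solve string) := by unfold Pre_solve; infer_instance

def pvWitness_solve : String := "bz"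

def Spec_solve (string : String) (out : Int) : Prop := out = solve_alt string
instance (string : String) (out : Int) : Decidable (Spec_solve string out) := by unfold Spec_solve; infer_instance

-- ===== CLAIM (what is proved, stated in full; the proofs are below) =====
def Claim_equal_solve : Prop := ∀ (string : String), Dom_solve string → Pre_solve string → Spec_solve string (solve string)

-- ===== LEMMAS AND PROOFS =====

def pvSum (p : List Char) : Int := p.foldl (fun s c => s + pvVal c) 0

lemma pvSplit_ne_nil (cs : List Char) : pvSplit cs ≠ [] := by
  cases cs with
  | nil => simp [pvSplit]
  | cons c cs =>
    simp only [pvSplit]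
    split
    · simp
    · cases h : pvSplit cs <;> simp

lemma pvFoldl_shift (p : List Char) : ∀ (a : Int),
    p.foldl (fun s c => s + pvVal c) a = a + p.foldl (fun s c => s + pvVal c) 0 := by
  induction p with
  | nil => intro a; simp
  | cons d p ih =>
    intro a
    simp only [List.foldl_cons]
    rw [ih (a + pvVal d), ih (0 + pvVal d)]
    ring

lemma pvSum_cons (c : Char) (p : List Char) : pvSum (c :: p) = pvVal c + pvSum p := by
  simp only [pvSum, List.foldl_cons]
  rw [pvFoldl_shift p (0 + pvVal c)]
  ring

-- addFirst: add cnt into the first segment's sum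
def pvAddFirst (cnt : Int) : List Int → List Int
  | [] => [cnt]
  | x :: xs => (cnt + x) :: xs

-- loop invariant: ans ++ [cnt] after the fold = ans before ++ sums of the split with cnt folded into the first
lemma solve_loop (cs : List Char) : ∀ (cnt : Int) (ans : List Int),
    ((cs.foldl solveStep (cnt, ans)).2 ++ [(cs.foldl solveStep (cnt, ans)).1])
      = ans ++ pvAddFirst cnt ((pvSplit cs).map pvSum) := by
  induction cs with
  | nil => intro cnt ans; simp [pvSplit, pvAddFirst, pvSum]
  | cons c cs ih =>
    intro cnt ans
    simp only [List.foldl_cons, solveStep]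
    rcases h : pvSplit cs with _ | ⟨p, ps⟩
    · exact absurd h (pvSplit_ne_nil cs)
    by_cases hv : pvVowel c
    · rw [hv]
      simp only [Bool.not_true]
      rw [if_neg Bool.false_ne_true, ih]
      simp [pvSplit, hv, pvAddFirst, h, pvSum]
    · rw [Bool.not_eq_true] at hv
      simp only [hv, Bool.not_false, if_true]
      rw [ih]
      simp only [pvSplit, hv, Bool.false_eq_true, if_false, h, List.map_cons, pvAddFirst]
      congr 2
      rw [pvSum_cons]
      ring

lemma solve_eq_alt (string : String) : solve string = solve_alt string := by
  simp only [solve, solve_alt]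
  rw [solve_loop string.toList 0 []]
  rcases h : pvSplit string.toList with _ | ⟨p, ps⟩
  · exact absurd h (pvSplit_ne_nil string.toList)
  · simp only [List.map_cons, pvAddFirst, List.nil_append, zero_add]
    rfl

-- ===== VERDICT (by name: the statement is the Claim_ definition above) =====
theorem solve_spec : Claim_equal_solve := by
  intro s _ _
  unfold Spec_solve
  exact solve_eq_alt s
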